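-- pv_equiv track=rewrite | github.com/seonhong-lee/algorithm | 1316.py | check_group_word
-- ===== SOURCE A (Python) =====
-- def check_group_word(words):
--     first_alpha = words[0]
--     check_set = {first_alpha}
--     for i in range(1, len(words)):
--         if words[i] == words[i-1]:
--             continue
--         elif words[i] != words[i-1] and words[i] not in check_set:
--             check_set.add(words[i])
--         else:
--             return False
--     return True
-- ===== SOURCE B (Python) =====
-- def check_group_word(words):
--     # collapse consecutive duplicate letters, then test uniqueness of the runs
--     compressed = [c for i, c in enumerate(words) if i == 0 or c != words[i - 1]]
--     return len(compressed) == len(set(compressed))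
-- ===== Notes on version B (the rewrite author's own statement) =====
-- stated objective: simpler
-- what changed: A's single online scan with a growing seen-set and early return is replaced by two declarative passes: collapse consecutive duplicates into a run list, then compare its length with the number of its distinct elements; Pre_ excludes only the empty string, on which A raises IndexError at words[0].
import Mathlib
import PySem

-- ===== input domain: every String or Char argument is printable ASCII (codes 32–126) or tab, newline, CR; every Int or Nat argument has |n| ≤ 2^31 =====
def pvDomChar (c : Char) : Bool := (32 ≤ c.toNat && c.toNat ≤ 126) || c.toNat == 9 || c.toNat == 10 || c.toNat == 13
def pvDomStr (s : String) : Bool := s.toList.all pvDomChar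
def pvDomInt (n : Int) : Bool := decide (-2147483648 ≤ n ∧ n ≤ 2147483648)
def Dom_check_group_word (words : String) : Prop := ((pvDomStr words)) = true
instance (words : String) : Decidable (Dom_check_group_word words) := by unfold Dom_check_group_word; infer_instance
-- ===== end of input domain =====

-- B replaces A's online scan (seen-set + early return) by two declarative passes: collapse consecutive duplicates, then a uniqueness test; objective: simpler.

-- ===== PORT A =====
-- the for-loop over range(1, len(words)) with its early 'return False'
def checkLoopA (ws : List Char) (cs : PySem.Set Char) : List Int → Bool
  | [] => true
  | i :: rest =>
    let c := PySem.List.pyGetD ws i ' '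
    let p := PySem.List.pyGetD ws (i - 1) ' '
    if c == p then checkLoopA ws cs rest
    else if c != p && !(PySem.Set.contains cs c) then checkLoopA ws (PySem.Set.add cs c) rest
    else false

def check_group_word (words : String) : Bool :=
  let ws := words.toList
  match PySem.List.pyGet? ws 0 with
  | none => false   -- words[0] raises IndexError: excluded by Pre_
  | some first_alpha =>
      checkLoopA ws (PySem.Set.add PySem.Set.empty first_alpha)
        (PySem.List.pyRange 1 (ws.length : Int) 1)

-- ===== PORT B =====
def check_group_word_alt (words : String) : Bool :=
  let ws := words.toList
  let compressed :=
    ((PySem.List.enumerate ws 0).filter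
      (fun q => q.1 == 0 || PySem.List.pyGetD ws (q.1 - 1) ' ' != q.2)).map (·.2)
  compressed.length == (PySem.Set.ofList compressed).length

-- ===== PRECONDITION & SPEC =====
-- Pre_ excludes only the empty string, on which A raises IndexError at words[0].
def Pre_check_group_word (words : String) : Prop := words ≠ ""
instance (words : String) : Decidable (Pre_check_group_word words) := by
  unfold Pre_check_group_word; infer_instance

def pvWitness_check_group_word : String := "aabbc"

def Spec_check_group_word (words : String) (out : Bool) : Prop := out = check_group_word_alt words
instance (words : String) (out : Bool) : Decidable (Spec_check_group_word words out) := by unfold Spec_check_group_word; infer_instance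

-- ===== CLAIM (what is proved, stated in full; the proofs are below) =====
def Claim_equal_check_group_word : Prop := ∀ (words : String), Dom_check_group_word words → Pre_check_group_word words → Spec_check_group_word words (check_group_word words)

-- ===== LEMMAS AND PROOFS =====

-- the run-collapsed tail of the word, given the previous character
def collapse (p : Char) : List Char → List Char
  | [] => []
  | c :: rest => if c = p then collapse p rest else c :: collapse c rest

-- A's loop, started just past position pre.length, succeeds iff the seen-set together
-- with the collapsed remainder is duplicate-free
theorem checkLoopA_eq_nodup (rest : List Char) : ∀ (pre : List Char) (p : Char)
    (cs : PySem.Set Char), cs.Nodup →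
    checkLoopA (pre ++ p :: rest) cs
      (PySem.List.pyRange ((pre.length : Int) + 1)
        ((pre.length : Int) + 1 + rest.length) 1) =
    decide ((cs ++ collapse p rest).Nodup) := by
  induction rest with
  | nil =>
    intro pre p cs hnd
    rw [PySem.List.pyRange_one_eq_nil (by simp)]
    simp [checkLoopA, collapse, hnd]
  | cons c rest' ih =>
    intro pre p cs hnd
    rw [PySem.List.pyRange_one_cons (by simp)]
    simp only [checkLoopA]
    have hgc : PySem.List.pyGetD (pre ++ p :: c :: rest') ((pre.length : Int) + 1) ' ' = c := by
      have : (pre.length : Int) + 1 = (((pre.length + 1 : Nat)) : Int) := by push_cast; ring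
      rw [this, PySem.List.pyGetD_natCast]
      simp [List.getD]
    have hgp : PySem.List.pyGetD (pre ++ p :: c :: rest') ((pre.length : Int) + 1 - 1) ' ' = p := by
      have : (pre.length : Int) + 1 - 1 = ((pre.length : Nat) : Int) := by ring
      rw [this, PySem.List.pyGetD_natCast]
      simp [List.getD]
    rw [hgc, hgp]
    have hws : pre ++ p :: c :: rest' = (pre ++ [p]) ++ c :: rest' := by simp
    have ihx := ih (pre ++ [p]) c
    simp only [List.length_append, List.length_cons, List.length_nil] at ihx
    have hcast : (pre.length : Int) + 1 + 1 = (((pre.length + 1 : Nat)) : Int) + 1 := by push_cast; ring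
    have hcast2 : (pre.length : Int) + 1 + ((c :: rest').length : Int)
        = (((pre.length + 1 : Nat)) : Int) + 1 + (rest'.length : Int) := by push_cast; simp; ring
    by_cases hc : c = p
    · subst hc
      simp only [BEq.rfl, if_true]
      rw [hcast, hcast2, hws]
      rw [ihx _ hnd]
      simp [collapse]
    · have hne : (c == p) = false := by simp [hc]
      rw [hne]
      simp only [if_false, Bool.false_eq_true]
      by_cases hmem : c ∈ cs
      · have : PySem.Set.contains cs c = true := (PySem.Set.contains_iff _ _).mpr hmem
        rw [this]
        simp only [Bool.not_true, Bool.and_false, if_false, Bool.false_eq_true]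
        have : ¬ (cs ++ collapse p (c :: rest')).Nodup := by
          simp only [collapse, hc, if_false]
          rw [List.nodup_append]
          rintro ⟨-, -, hdisj⟩
          exact hdisj c hmem c (by simp) rfl
        simp [this]
      · have hcont : PySem.Set.contains cs c = false := by
          simp [hmem]
        rw [hcont]
        have hadd : PySem.Set.add cs c = cs ++ [c] := PySem.Set.add_of_not_mem hmem
        have hnd' : (cs ++ [c]).Nodup := by
          rw [List.nodup_append]
          refine ⟨hnd, List.nodup_singleton c, ?_⟩
          intro a ha b hb
          simp only [List.mem_singleton] at hb
          subst hb
          intro h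
          exact hmem (h ▸ ha)
        simp only [bne, hne, Bool.not_false, Bool.true_and, if_true]
        rw [hadd, hcast, hcast2, hws, ihx _ hnd']
        simp [collapse, hc, List.append_assoc]

-- B's comprehension, from position pre.length + 1 on, produces exactly the collapsed tail
theorem compressed_eq_collapse (rest : List Char) : ∀ (pre : List Char) (p : Char),
    ((PySem.List.enumerate rest ((pre.length : Int) + 1)).filter
      (fun q => q.1 == 0 || PySem.List.pyGetD (pre ++ p :: rest) (q.1 - 1) ' ' != q.2)).map (·.2)
      = collapse p rest := by
  induction rest with
  | nil => intro pre p; simp [PySem.List.enumerate, collapse]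
  | cons c rest' ih =>
    intro pre p
    rw [PySem.List.enumerate_cons]
    have h0 : (((pre.length : Int) + 1) == 0) = false := by
      simp
      omega
    have ihx := ih (pre ++ [p]) c
    simp only [List.length_append, List.length_cons, List.length_nil] at ihx
    have hcast : ((pre.length : Int) + 1) + 1 = (((pre.length + 1 : Nat) : Int)) + 1 := by push_cast; ring
    have hws : pre ++ p :: c :: rest' = (pre ++ [p]) ++ c :: rest' := by simp
    by_cases hc : c = p
    · subst hc
      rw [List.filter_cons_of_neg]
      · rw [hcast, hws] at *
        rw [ihx]
        simp [collapse]
      · simp [h0]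
    · rw [List.filter_cons_of_pos]
      · rw [List.map_cons]
        rw [hcast, hws] at *
        rw [ihx]
        simp [collapse, hc]
      · simp [h0]
        exact fun h => hc h.symm

-- the set of a list has the list's length exactly when the list has no repeats
theorem len_ofList_eq_iff (l : List Char) :
    (PySem.Set.ofList l).length = l.length ↔ l.Nodup := by
  constructor
  · induction l with
    | nil => intro _; exact List.nodup_nil
    | cons x xs ih =>
      intro h
      rw [PySem.Set.ofList_cons] at h
      simp only [List.length_cons] at h
      have hle : ((PySem.Set.ofList xs).discard x).length ≤ (PySem.Set.ofList xs).length :=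
        List.length_filter_le _ _
      have hle2 := PySem.Set.length_ofList_le xs
      have h2 : (PySem.Set.ofList xs).length = xs.length := by omega
      have hx : x ∉ xs := by
        intro hx
        have hmem : x ∈ PySem.Set.ofList xs := (PySem.Set.mem_ofList _ _).mpr hx
        have hlt : ((PySem.Set.ofList xs).discard x).length < (PySem.Set.ofList xs).length := by
          apply List.length_filter_lt_length_iff_exists.mpr
          exact ⟨x, hmem, by simp⟩
        omega
      exact List.Nodup.cons (fun h' => hx h') (ih h2)
  · intro h; rw [PySem.Set.ofList_eq_self_of_nodup _ h]

-- ===== VERDICT (by name: the statement is the Claim_ definition above) =====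
theorem check_group_word_spec : Claim_equal_check_group_word := by
  intro words _ hpre
  unfold Spec_check_group_word
  have hnil : words.toList ≠ [] := by
    intro h
    exact hpre (by simpa using congrArg String.ofList h)
  obtain ⟨h, t, hlist⟩ : ∃ h t, words.toList = h :: t := by
    cases hl : words.toList with
    | nil => exact absurd hl hnil
    | cons a l => exact ⟨a, l, rfl⟩
  simp only [check_group_word, check_group_word_alt, hlist, PySem.List.pyGet?_zero_cons]
  have hadd : PySem.Set.add PySem.Set.empty h = [h] := rfl
  rw [hadd]
  have hlen : (((h :: t).length : Nat) : Int) = 1 + (t.length : Int) := by push_cast; simp; ring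
  rw [hlen]
  have hA := checkLoopA_eq_nodup t [] h [h] (List.nodup_singleton h)
  simp only [List.nil_append, List.length_nil, Nat.cast_zero, zero_add] at hA
  rw [hA]
  -- B side
  rw [PySem.List.enumerate_cons]
  rw [List.filter_cons_of_pos (by simp)]
  rw [List.map_cons]
  have hB := compressed_eq_collapse t [] h
  simp only [List.nil_append, List.length_nil, Nat.cast_zero, zero_add] at hB ⊢
  rw [hB]
  -- both sides are about h :: collapse h t
  by_cases hN : (h :: collapse h t).Nodup
  · rw [decide_eq_true (by simpa using hN)]
    rw [PySem.Set.ofList_eq_self_of_nodup _ hN]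
    simp
  · rw [decide_eq_false (by simpa using hN)]
    have hne : (h :: collapse h t).length ≠ (PySem.Set.ofList (h :: collapse h t)).length :=
      fun he => hN ((len_ofList_eq_iff _).mp he.symm)
    simp only [List.length_cons] at hne ⊢
    simp [hne]
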